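-- pv_equiv track=rewrite | github.com/ABI-Compute/Voxy | compiler_modules/utils.py | GetAssignValue
-- ===== SOURCE A (Python) =====
-- def GetAssignValue(toks: list[str]) -> str:
--     type_found = False
--     value = ""
--     for t in toks:
--         if type_found:
--             value += t + " "
--         if t == "=":
--             type_found = True
--     return value.strip()
-- ===== SOURCE B (Python) =====
-- def GetAssignValue(toks: list[str]) -> str:
--     if "=" not in toks:
--         return ""
--     idx = toks.index("=")
--     return " ".join(toks[idx + 1:]).strip()
-- ===== Notes on version B (the rewrite author's own statement) =====
-- stated objective: simpler
-- what changed: Replaces the boolean-flag/accumulator state machine with a two-phase locate-then-slice: find the first '=' with index, then join-and-strip the tail slice.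
import Mathlib
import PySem

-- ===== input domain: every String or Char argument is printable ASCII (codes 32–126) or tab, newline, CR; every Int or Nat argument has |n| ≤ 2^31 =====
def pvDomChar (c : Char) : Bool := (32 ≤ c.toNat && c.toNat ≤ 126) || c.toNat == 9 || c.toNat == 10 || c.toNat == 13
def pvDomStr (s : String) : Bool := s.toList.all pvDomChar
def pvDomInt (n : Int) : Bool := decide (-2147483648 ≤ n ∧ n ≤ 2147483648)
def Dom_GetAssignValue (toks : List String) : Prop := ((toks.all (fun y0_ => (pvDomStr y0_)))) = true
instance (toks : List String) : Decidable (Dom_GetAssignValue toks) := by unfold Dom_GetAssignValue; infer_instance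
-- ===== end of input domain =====

-- B replaces A's boolean-flag accumulator loop by locating the first "=" and join-then-strip of the tail slice (same return value; no speed claim).

-- ===== PORT A =====
-- string concatenation 'value += t + " "' is ported on code points (List Char), the final .strip() via PySem.Chars.strip
def GetAssignValue (toks : List String) : String :=
  let r := toks.foldl
    (fun (s : Bool × List Char) t =>
      (s.1 || (t == "="), if s.1 then s.2 ++ (t.toList ++ [' ']) else s.2))
    (false, ([] : List Char))
  String.ofList (PySem.Chars.strip r.2)

-- ===== PORT B =====
def GetAssignValue_alt (toks : List String) : String :=
  if "=" ∈ toks then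
    -- toks.index("=") cannot raise here, so the port reads the known-present index
    let i := (PySem.List.index? toks "=").getD 0
    PySem.Str.strip (PySem.Str.join " " (PySem.List.slice toks (some ((i : Int) + 1)) none))
  else ""

-- ===== PRECONDITION & SPEC =====
def Spec_GetAssignValue (toks : List String) (out : String) : Prop := out = GetAssignValue_alt toks
instance (toks : List String) (out : String) : Decidable (Spec_GetAssignValue toks out) := by unfold Spec_GetAssignValue; infer_instance

-- ===== CLAIM (what is proved, stated in full; the proofs are below) =====
def Claim_equal_GetAssignValue : Prop := ∀ (toks : List String), Dom_GetAssignValue toks → Spec_GetAssignValue toks (GetAssignValue toks)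

-- ===== LEMMAS AND PROOFS =====

-- rstrip drops a trailing space
theorem pv_rstrip_append_space (s : List Char) :
    PySem.Chars.rstrip (s ++ [' ']) = PySem.Chars.rstrip s := by
  simp [PySem.Chars.rstrip, PySem.Chars.isspace]

-- strip drops a trailing space
theorem pv_strip_append_space (s : List Char) :
    PySem.Chars.strip (s ++ [' ']) = PySem.Chars.strip s := by
  unfold PySem.Chars.strip PySem.Chars.lstrip
  rw [List.dropWhile_append]
  by_cases h : (List.dropWhile PySem.Chars.isspace s).isEmpty = true
  · simp [PySem.Chars.rstrip, PySem.Chars.isspace, List.isEmpty_iff.mp h]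
  · simp [h, pv_rstrip_append_space]

-- A's tail accumulation equals the " "-join of the pieces followed by one trailing space
theorem pv_flatten_eq_join (p : List Char) (ps : List (List Char)) :
    ((p :: ps).map (· ++ [' '])).flatten = PySem.Chars.join [' '] (p :: ps) ++ [' '] := by
  induction ps generalizing p with
  | nil => simp [PySem.Chars.join, List.intercalate]
  | cons q qs ih =>
      have hj : PySem.Chars.join [' '] (p :: q :: qs) = p ++ ' ' :: PySem.Chars.join [' '] (q :: qs) := by
        simp [PySem.Chars.join, List.intercalate]
      rw [List.map_cons, List.flatten_cons, ih q, hj]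
      simp

-- the loop with the flag already set appends t + " " for every remaining token
theorem pv_foldl_true (l : List String) (v : List Char) :
    l.foldl
      (fun (s : Bool × List Char) t =>
        (s.1 || (t == "="), if s.1 then s.2 ++ (t.toList ++ [' ']) else s.2))
      (true, v)
    = (true, v ++ ((l.map String.toList).map (· ++ [' '])).flatten) := by
  induction l generalizing v with
  | nil => simp
  | cons t l ih => simp [ih]

-- before any "=", the loop does nothing
theorem pv_foldl_false (l : List String) (h : "=" ∉ l) :
    l.foldl
      (fun (s : Bool × List Char) t =>
        (s.1 || (t == "="), if s.1 then s.2 ++ (t.toList ++ [' ']) else s.2))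
      (false, ([] : List Char))
    = (false, ([] : List Char)) := by
  induction l with
  | nil => rfl
  | cons t l ih =>
      simp only [List.mem_cons, not_or] at h
      have ht : (t == "=") = false := beq_eq_false_iff_ne.mpr (fun e => h.1 e.symm)
      simp [List.foldl_cons, ht, ih h.2]

-- the two ports agree on the strip of the joined tail
theorem pv_strip_tail (suf : List String) :
    String.ofList (PySem.Chars.strip ((suf.map String.toList).map (· ++ [' '])).flatten)
      = PySem.Str.strip (PySem.Str.join " " suf) := by
  cases suf with
  | nil => rfl
  | cons p ps =>
      rw [List.map_cons, pv_flatten_eq_join, pv_strip_append_space]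
      rw [← String.ofList_toList (s := PySem.Str.strip (PySem.Str.join " " (p :: ps)))]
      rw [PySem.Str.toList_strip, PySem.Str.toList_join]
      simp

-- ===== VERDICT (by name: the statement is the Claim_ definition above) =====
theorem GetAssignValue_spec : Claim_equal_GetAssignValue := by
  intro toks _
  unfold Spec_GetAssignValue GetAssignValue GetAssignValue_alt
  by_cases hm : "=" ∈ toks
  · rw [if_pos hm]
    obtain ⟨i, hi⟩ := Option.isSome_iff_exists.mp ((PySem.List.index?_isSome_iff toks "=").mpr hm)
    obtain ⟨pre, suf, htoks, hlen, hpre⟩ := (PySem.List.index?_eq_some_iff toks "=" i).mp hi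
    have hslice : PySem.List.slice toks (some ((i : Int) + 1)) none = suf := by
      have hc : ((i : Int) + 1) = (((i + 1 : Nat)) : Int) := by push_cast; ring
      rw [hc, PySem.List.slice_from_natCast, htoks, ← hlen]
      simp
    rw [hi]
    simp only [Option.getD_some, hslice]
    rw [htoks, List.foldl_append, pv_foldl_false pre hpre]
    simp only [List.foldl_cons, beq_self_eq_true, Bool.false_or]
    rw [pv_foldl_true]
    simpa using pv_strip_tail suf
  · rw [if_neg hm]
    rw [pv_foldl_false toks hm]
    rfl
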